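-- pv_equiv track=rewrite | github.com/Adamits/tUMPC | src/abstract_paradigm.py | greedyAlign
-- ===== SOURCE A (Python) =====
-- from typing import Dict, List, Tuple
--
-- def alignVariables(sqs: List[str], variables: List[str]) -> List[str]:
--     """Align the seqs, replacing each `variable` string with an identifier of the form: Xi
--
--     e.g. sqs:       ['ausländer', 'ausländische', 'ausländischen', 'ausländern']
--          variables: ['ausländ', 'e']
--     --> 'X0+X1+r', 'X0+isch+X1', 'X0+isch+X1+n', 'X0+X1+rn']"""
--     results = []
--     for sq in sqs:
--         res = ""
--         curr = 0
--         for i,v in enumerate(variables):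
--             match = sq.find(v,curr)
--             if i > 0:
--                 res += "+"
--             if curr < match:
--                 res += sq[curr:match] + "+"
--             res += ("X%u" % i)
--
--             curr = match + len(v)
--         if curr < len(sq):
--             res += "+" + sq[curr:]
--
--         results.append(res)
--
--     return results
--
-- def greedyAlign(lcs: str, sqs: List[str]) -> Tuple[Dict[Tuple, str], List[str]]:
--     """Make the abstract paradigms, replacing common substrings with variables.
--
--     e.g. lcs: auslände
--          sqs: ['ausländer', 'ausländische', 'ausländischen', 'ausländern']
--         --> ['X0+X1+r', 'X0+isch+X1', 'X0+isch+X1+n', 'X0+X1+rn']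
--     """
--     indices = [0 for sq in sqs]
--     variables = [""]
--     for c in lcs:
--         split = False
--         for i in range(len(indices)):
--             while indices[i] < len(sqs[i]) and sqs[i][indices[i]] != c:
--                 split = True
--                 indices[i] += 1
--             indices[i] += 1
--         if split:
--             variables += [""]
--         variables[-1] += c
--
--     variables = [v for v in variables if v]
--
--     return {("X%u" % i):v for i,v in enumerate(variables)}, alignVariables(sqs,variables)
-- ===== SOURCE B (Python) =====
-- from typing import Dict, List, Tuple
--
-- def _flags(sq: str, lcs: str) -> List[bool]:
--     """Greedy match scan of lcs over sq: for each lcs char, whether the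
--     cursor had to skip forward (or run off the end) before matching it."""
--     flags = []
--     cur = 0
--     for c in lcs:
--         if cur >= len(sq):
--             flags.append(False)
--             cur += 1
--             continue
--         p = sq.find(c, cur)
--         if p == -1:
--             p = len(sq)
--         flags.append(p > cur)
--         cur = p + 1
--     return flags
--
-- def _alignOne(sq: str, variables: List[str]) -> str:
--     parts = []
--     curr = 0
--     for i, v in enumerate(variables):
--         match = sq.find(v, curr)
--         if curr < match:
--             parts.append(sq[curr:match])
--         parts.append("X%u" % i)
--         curr = match + len(v)
--     if curr < len(sq):
--         parts.append(sq[curr:])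
--     return "+".join(parts)
--
-- def greedyAlign(lcs: str, sqs: List[str]) -> Tuple[Dict[Tuple, str], List[str]]:
--     # Phase 1+2: per-sequence greedy-match flag tables, OR-ed pointwise.
--     split_at = [False] * len(lcs)
--     for sq in sqs:
--         split_at = [a or b for a, b in zip(split_at, _flags(sq, lcs))]
--     # Phase 3: slice lcs at the boundaries (a boundary before lcs[k], k >= 1).
--     variables = []
--     start = 0
--     for k in range(1, len(lcs)):
--         if split_at[k]:
--             variables.append(lcs[start:k])
--             start = k
--     if lcs:
--         variables.append(lcs[start:])
--     d = {("X%u" % i): v for i, v in enumerate(variables)}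
--     return d, [_alignOne(sq, variables) for sq in sqs]
-- ===== Notes on version B (the rewrite author's own statement) =====
-- stated objective: alternative
-- what changed: A interleaves everything in one scan (per-lcs-character inner loop advancing shared per-sequence indices with a hand-written while, growing the variables list in place, then filtering empties); B is three separate passes: a per-sequence greedy-match flag table built with str.find, a pointwise OR giving boundary flags, then slicing lcs at those boundaries, and the alignment builds a parts list joined with '+' instead of repeated string concatenation.
-- intended difference: When lcs is empty and some sequence is non-empty, A returns each non-empty sequence with a spurious leading '+' (e.g. '+word'); B returns the sequence unchanged, the intended alignment when there are no variables. — e.g. on greedyAlign("", ["a"]): A returns ([], ["+a"]), B returns ([], ["a"])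
import Mathlib
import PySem

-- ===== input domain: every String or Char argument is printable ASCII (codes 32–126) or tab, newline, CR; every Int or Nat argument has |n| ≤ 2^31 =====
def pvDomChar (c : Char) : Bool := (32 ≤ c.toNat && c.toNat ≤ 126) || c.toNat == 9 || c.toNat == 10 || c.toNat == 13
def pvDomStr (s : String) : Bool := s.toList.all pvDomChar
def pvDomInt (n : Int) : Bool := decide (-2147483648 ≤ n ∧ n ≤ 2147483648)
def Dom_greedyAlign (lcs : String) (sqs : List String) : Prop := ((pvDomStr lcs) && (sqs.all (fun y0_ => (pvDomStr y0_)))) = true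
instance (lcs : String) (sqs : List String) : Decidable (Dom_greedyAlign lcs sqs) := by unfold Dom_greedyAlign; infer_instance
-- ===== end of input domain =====

-- B rebuilds the paradigms in three separate passes (per-sequence flag tables, OR-ed boundary
-- flags, slicing lcs at the boundaries; '+'-join of a parts list) instead of A's single
-- interleaved scan; same cost, different decomposition ("alternative").

-- ===== PORT A =====
-- while indices[i] < len(sqs[i]) and sqs[i][indices[i]] != c: split = True; indices[i] += 1
-- fuel-indexed structural recursion; called with fuel = len(sqs[i]), enough for the whole scan
def pvWhileA (s : List Char) (c : Char) : Nat → Nat → Bool → Nat × Bool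
  | 0, idx, split => (idx, split)
  | fuel + 1, idx, split =>
    if h : idx < s.length then
      if s[idx] ≠ c then pvWhileA s c fuel (idx + 1) true
      else (idx, split)
    else (idx, split)

-- for i in range(len(indices)): … ; indices[i] += 1   (indices zipped with sqs)
def pvInnerA (c : Char) (st : List (Nat × List Char)) (split : Bool) :
    List (Nat × List Char) × Bool :=
  match st with
  | [] => ([], split)
  | (idx, s) :: rest =>
    let r := pvWhileA s c s.length idx split
    let rr := pvInnerA c rest r.2
    ((r.1 + 1, s) :: rr.1, rr.2)

-- vbls[-1] += c
def pvAppendLast (vs : List (List Char)) (c : Char) : List (List Char) :=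
  match vs with
  | [] => []
  | [v] => [v ++ [c]]
  | v :: rest => v :: pvAppendLast rest c

-- for c in lcs: …
def pvCharLoopA (cs : List Char) (st : List (Nat × List Char)) (vars : List (List Char)) :
    List (List Char) :=
  match cs with
  | [] => vars
  | c :: rest =>
    let r := pvInnerA c st false
    pvCharLoopA rest r.1 (pvAppendLast (if r.2 then vars ++ [[]] else vars) c)

-- inner loop of alignVariables: for i,v in enumerate(vbls): …
def pvAlignLoopA (sq : List Char) (ivs : List (Int × List Char)) (res : List Char)
    (curr : Int) : List Char × Int :=
  match ivs with
  | [] => (res, curr)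
  | (i, v) :: rest =>
    let m := PySem.Chars.findFrom sq v curr none
    let res := if (0:Int) < i then res ++ ['+'] else res
    let res := if curr < m then res ++ PySem.Chars.slice sq (some curr) (some m) ++ ['+'] else res
    let res := res ++ ('X' :: PySem.Int.toChars i)
    pvAlignLoopA sq rest res (m + v.length)

def pvAlignOneA (sq : List Char) (vbls : List (List Char)) : List Char :=
  let r := pvAlignLoopA sq (PySem.List.enumerate vbls 0) [] 0
  if r.2 < (sq.length : Int) then r.1 ++ '+' :: PySem.Chars.slice sq (some r.2) none else r.1

def greedyAlign (lcs : String) (sqs : List String) :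
    (List (String × String)) × List String :=
  let sl := sqs.map String.toList
  let vars0 := pvCharLoopA lcs.toList (sl.map (fun s => (0, s))) [[]]
  let vbls := vars0.filter (fun v => !v.isEmpty)
  ((PySem.List.enumerate vbls 0).map
      (fun iv => (String.ofList ('X' :: PySem.Int.toChars iv.1), String.ofList iv.2)),
   sl.map (fun sq => String.ofList (pvAlignOneA sq vbls)))

-- ===== PORT B =====
-- _flags: greedy scan of lcs over one sequence via str.find(c, cur)
def pvFlagsB (sq : List Char) (cs : List Char) (cur : Nat) : List Bool :=
  match cs with
  | [] => []
  | c :: rest =>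
    if sq.length ≤ cur then false :: pvFlagsB sq rest (cur + 1)
    else
      let f := PySem.Chars.findFrom sq [c] (cur : Int) none
      let p := if f = -1 then sq.length else f.toNat
      decide (cur < p) :: pvFlagsB sq rest (p + 1)

-- split_at = [a or b for a, b in zip(split_at, _flags(sq, lcs))], folded over sqs
def pvSplitAtB (cs : List Char) (sl : List (List Char)) : List Bool :=
  sl.foldl (fun acc s => List.zipWith (· || ·) acc (pvFlagsB s cs 0))
    (List.replicate cs.length false)

-- for k in range(1, len(lcs)): if split_at[k]: vbls.append(lcs[start:k]); start = k
-- (split_at[k] is always in range — len(split_at) = len(lcs) — so pyGetD's default is never used)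
def pvSegStepB (L : List Char) (bs : List Bool) (p : List (List Char) × Int) (k : Int) :
    List (List Char) × Int :=
  if PySem.List.pyGetD bs k false then
    (p.1 ++ [PySem.List.slice L (some p.2) (some k)], k)
  else p

-- _alignOne's loop: parts list instead of string concatenation
def pvAlignPartsB (sq : List Char) (ivs : List (Int × List Char))
    (parts : List (List Char)) (curr : Int) : List (List Char) × Int :=
  match ivs with
  | [] => (parts, curr)
  | (i, v) :: rest =>
    let m := PySem.Chars.findFrom sq v curr none
    let parts := if curr < m then parts ++ [PySem.Chars.slice sq (some curr) (some m)] else parts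
    let parts := parts ++ [('X' :: PySem.Int.toChars i)]
    pvAlignPartsB sq rest parts (m + v.length)

def pvAlignOneB (sq : List Char) (vbls : List (List Char)) : List Char :=
  let r := pvAlignPartsB sq (PySem.List.enumerate vbls 0) [] 0
  let parts := if r.2 < (sq.length : Int) then r.1 ++ [PySem.Chars.slice sq (some r.2) none] else r.1
  PySem.Chars.join ['+'] parts

def greedyAlign_alt (lcs : String) (sqs : List String) :
    (List (String × String)) × List String :=
  let sl := sqs.map String.toList
  let L := lcs.toList
  let splitAt := pvSplitAtB L sl
  let r := (PySem.List.pyRange 1 (L.length : Int) 1).foldl (pvSegStepB L splitAt) ([], 0)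
  let vbls := if L.isEmpty then r.1 else r.1 ++ [PySem.List.slice L (some r.2) none]
  ((PySem.List.enumerate vbls 0).map
      (fun iv => (String.ofList ('X' :: PySem.Int.toChars iv.1), String.ofList iv.2)),
   sl.map (fun sq => String.ofList (pvAlignOneB sq vbls)))

-- ===== PRECONDITION & SPEC =====
-- When lcs is empty and some sequence is non-empty, A returns each non-empty sequence with a
-- spurious leading '+' ("+word"); B returns the sequence unchanged, the intended alignment
-- with no vbls.
def D_greedyAlign (lcs : String) (sqs : List String) : Prop :=
  lcs = "" ∧ ∃ sq ∈ sqs, sq ≠ ""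
instance (lcs : String) (sqs : List String) : Decidable (D_greedyAlign lcs sqs) := by
  unfold D_greedyAlign; infer_instance

def Spec_greedyAlign (lcs : String) (sqs : List String)
    (out : (List (String × String)) × List String) : Prop :=
  ¬ D_greedyAlign lcs sqs → out = greedyAlign_alt lcs sqs
instance (lcs : String) (sqs : List String) (out : (List (String × String)) × List String) :
    Decidable (Spec_greedyAlign lcs sqs out) := by unfold Spec_greedyAlign; infer_instance

def pvDiffWitness_greedyAlign : String × List String := ("", ["a"])
def pvDiffWitnessOut_greedyAlign :
    ((List (String × String)) × List String) × ((List (String × String)) × List String) :=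
  (([], ["+a"]), ([], ["a"]))

-- ===== CLAIM (what is proved, stated in full; the proofs are below) =====
def Claim_unchanged_greedyAlign : Prop := ∀ (lcs : String) (sqs : List String),
  Dom_greedyAlign lcs sqs → Spec_greedyAlign lcs sqs (greedyAlign lcs sqs)
def Claim_changed_greedyAlign : Prop :=
  Dom_greedyAlign (pvDiffWitness_greedyAlign.1) (pvDiffWitness_greedyAlign.2) ∧
  D_greedyAlign (pvDiffWitness_greedyAlign.1) (pvDiffWitness_greedyAlign.2) ∧
  greedyAlign (pvDiffWitness_greedyAlign.1) (pvDiffWitness_greedyAlign.2) = pvDiffWitnessOut_greedyAlign.1 ∧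
  greedyAlign_alt (pvDiffWitness_greedyAlign.1) (pvDiffWitness_greedyAlign.2) = pvDiffWitnessOut_greedyAlign.2 ∧
  pvDiffWitnessOut_greedyAlign.1 ≠ pvDiffWitnessOut_greedyAlign.2
def Claim_exact_greedyAlign : Prop := ∀ (lcs : String) (sqs : List String),
  Dom_greedyAlign lcs sqs → D_greedyAlign lcs sqs → greedyAlign lcs sqs ≠ greedyAlign_alt lcs sqs

-- ===== LEMMAS AND PROOFS =====

-- ---- phase 1: characterize A's while-scan by the find-based position ----

-- position of the first occurrence of c in s at or after idx (s.length if absent, idx if idx past the end)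
def bpos (s : List Char) (idx : Nat) (c : Char) : Nat :=
  if s.length ≤ idx then idx
  else if PySem.Chars.find (s.drop idx) [c] = -1 then s.length
  else idx + (PySem.Chars.find (s.drop idx) [c]).toNat

theorem find_go_shift (sub : List Char) (t : List Char) (k : Nat) :
    PySem.Chars.find.go sub t k =
      if PySem.Chars.find.go sub t 0 = -1 then -1 else PySem.Chars.find.go sub t 0 + k := by
  induction t generalizing k with
  | nil =>
    simp only [PySem.Chars.find.go]
    by_cases h : sub.isEmpty <;> simp [h]
  | cons x t ih =>
    simp only [PySem.Chars.find.go]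
    by_cases h : sub.isPrefixOf (x :: t) <;> simp only [h, if_true]
    · simp
    · rw [ih (k+1), ih 1]
      have := PySem.Chars.neg_one_le_find t sub
      have h0 : PySem.Chars.find t sub = PySem.Chars.find.go sub t 0 := rfl
      by_cases hg : PySem.Chars.find.go sub t 0 = -1 <;> simp [hg] <;> omega

theorem find_cons (x c : Char) (t : List Char) :
    PySem.Chars.find (x :: t) [c] =
      if x = c then 0
      else if PySem.Chars.find t [c] = -1 then -1 else PySem.Chars.find t [c] + 1 := by
  show PySem.Chars.find.go [c] (x :: t) 0 = _
  simp only [PySem.Chars.find.go]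
  have hpre : [c].isPrefixOf (x :: t) = (c == x) := by
    simp [List.isPrefixOf]
  rw [hpre]
  by_cases h : x = c
  · simp [h]
  · have : (c == x) = false := by simp [Ne.symm h]
    rw [this]
    simp only [h, if_false, Bool.false_eq_true]
    rw [find_go_shift]
    rfl

theorem bpos_stop {s : List Char} {idx : Nat} {c : Char} (h : idx < s.length)
    (he : s[idx] = c) : bpos s idx c = idx := by
  unfold bpos
  rw [List.drop_eq_getElem_cons h, find_cons]
  simp [he, Nat.not_le.mpr h]

theorem bpos_skip {s : List Char} {idx : Nat} {c : Char} (h : idx < s.length)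
    (hne : s[idx] ≠ c) : bpos s idx c = bpos s (idx + 1) c := by
  have hfe : PySem.Chars.find (s.drop idx) [c] =
      if PySem.Chars.find (s.drop (idx+1)) [c] = -1 then -1
      else PySem.Chars.find (s.drop (idx+1)) [c] + 1 := by
    rw [List.drop_eq_getElem_cons h, find_cons]
    simp [hne]
  by_cases h1 : idx + 1 < s.length
  · unfold bpos
    have hge := PySem.Chars.neg_one_le_find (s.drop (idx+1)) [c]
    by_cases hm : PySem.Chars.find (s.drop (idx+1)) [c] = -1
    · simp [hfe, hm, Nat.not_le.mpr h, Nat.not_le.mpr h1]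
    · have hpos : 0 ≤ PySem.Chars.find (s.drop (idx+1)) [c] := by omega
      have : PySem.Chars.find (s.drop idx) [c] = PySem.Chars.find (s.drop (idx+1)) [c] + 1 := by
        rw [hfe, if_neg hm]
      simp only [Nat.not_le.mpr h, if_false, Nat.not_le.mpr h1, this]
      have hne2 : PySem.Chars.find (s.drop (idx+1)) [c] + 1 ≠ -1 := by omega
      simp only [hne2, if_false, hm]
      omega
  · -- idx + 1 = s.length : drop (idx+1) = [] and find [] [c] = -1
    have hlen : idx + 1 = s.length := by omega
    have hdrop : s.drop (idx+1) = [] := by simp [hlen]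
    have hm : PySem.Chars.find (s.drop (idx+1)) [c] = -1 := by
      rw [hdrop]; simp [PySem.Chars.find, PySem.Chars.find.go]
    have hm2 : PySem.Chars.find (s.drop idx) [c] = -1 := by rw [hfe, if_pos hm]
    unfold bpos
    simp only [Nat.not_le.mpr h, if_false, hm2, if_pos, hlen]
    have h2 : s.length ≤ idx + 1 := by omega
    simp [h2, hlen]

theorem bpos_ge (s : List Char) (idx : Nat) (c : Char) : idx ≤ bpos s idx c := by
  unfold bpos
  split
  · omega
  · split
    · omega
    · omega

theorem whileA_eq (s : List Char) (c : Char) :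
    ∀ (fuel idx : Nat) (split : Bool), s.length - idx ≤ fuel →
      pvWhileA s c fuel idx split = (bpos s idx c, split || decide (idx < bpos s idx c)) := by
  intro fuel
  induction fuel with
  | zero =>
    intro idx split hf
    have hle : s.length ≤ idx := by omega
    simp [pvWhileA, bpos, hle]
  | succ fuel ih =>
    intro idx split hf
    simp only [pvWhileA]
    by_cases h : idx < s.length
    · simp only [dif_pos h]
      by_cases he : s[idx] = c
      · simp [he, bpos_stop h he]
      · have hb := bpos_skip h he
        have hg := bpos_ge s (idx + 1) c
        simp only [he, ne_eq, not_false_eq_true, if_pos]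
        rw [ih (idx + 1) true (by omega), hb]
        have : decide (idx < bpos s (idx + 1) c) = true := by simp; omega
        simp [this]
    · have hle : s.length ≤ idx := by omega
      simp [dif_neg h, bpos, hle]

-- ---- phase 2: per-character column of flags / transpose to B's per-sequence tables ----

def pstep (c : Char) (p : Nat × List Char) : Nat × List Char := (bpos p.2 p.1 c + 1, p.2)
def sflag (c : Char) (p : Nat × List Char) : Bool := decide (p.1 < bpos p.2 p.1 c)

def orFlags : List Char → List (Nat × List Char) → List Bool
  | [], _ => []
  | c :: cs, st => st.any (sflag c) :: orFlags cs (st.map (pstep c))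

theorem innerA_eq (c : Char) : ∀ (st : List (Nat × List Char)) (split : Bool),
    pvInnerA c st split = (st.map (pstep c), split || st.any (sflag c)) := by
  intro st
  induction st with
  | nil => intro split; simp [pvInnerA]
  | cons p rest ih =>
    intro split
    obtain ⟨idx, sq⟩ := p
    simp only [pvInnerA, whileA_eq sq c sq.length idx split (by omega), ih, List.map_cons,
      List.any_cons, Prod.mk.injEq]
    exact ⟨rfl, by simp [sflag, Bool.or_assoc]⟩

def varsOf (vars : List (List Char)) : List Bool → List Char → List (List Char)
  | b :: bs, c :: cs => varsOf (pvAppendLast (if b then vars ++ [[]] else vars) c) bs cs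
  | _, _ => vars

theorem charLoopA_eq : ∀ (cs : List Char) (st : List (Nat × List Char)) (vars : List (List Char)),
    pvCharLoopA cs st vars = varsOf vars (orFlags cs st) cs := by
  intro cs
  induction cs with
  | nil => intro st vars; simp [pvCharLoopA, varsOf, orFlags]
  | cons c rest ih =>
    intro st vars
    simp only [pvCharLoopA, innerA_eq, orFlags, varsOf, Bool.false_or, ih]

theorem flagsB_cons (sq : List Char) (c : Char) (cs : List Char) (cur : Nat) :
    pvFlagsB sq (c :: cs) cur =
      decide (cur < bpos sq cur c) :: pvFlagsB sq cs (bpos sq cur c + 1) := by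
  simp only [pvFlagsB]
  by_cases h : sq.length ≤ cur
  · have : bpos sq cur c = cur := by simp [bpos, h]
    simp [h, this]
  · have hcur : cur ≤ sq.length := by omega
    rw [if_neg h]
    rw [PySem.Chars.findFrom_natCast sq [c] cur hcur]
    have hge := PySem.Chars.neg_one_le_find (sq.drop cur) [c]
    by_cases hm : PySem.Chars.find (sq.drop cur) [c] = -1
    · have : bpos sq cur c = sq.length := by simp [bpos, h, hm]
      simp [hm, this]
    · have hpos : 0 ≤ PySem.Chars.find (sq.drop cur) [c] := by omega
      have hne : (cur : Int) + PySem.Chars.find (sq.drop cur) [c] ≠ -1 := by omega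
      have htn : ((cur : Int) + PySem.Chars.find (sq.drop cur) [c]).toNat =
          cur + (PySem.Chars.find (sq.drop cur) [c]).toNat := by omega
      have : bpos sq cur c = cur + (PySem.Chars.find (sq.drop cur) [c]).toNat := by
        simp [bpos, h, hm]
      simp [hm, hne, htn, this]

theorem flagsB_length (sq : List Char) : ∀ (cs : List Char) (cur : Nat),
    (pvFlagsB sq cs cur).length = cs.length := by
  intro cs
  induction cs with
  | nil => intro cur; simp [pvFlagsB]
  | cons c rest ih => intro cur; rw [flagsB_cons]; simp [ih]

theorem orFlags_length : ∀ (cs : List Char) (st : List (Nat × List Char)),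
    (orFlags cs st).length = cs.length := by
  intro cs
  induction cs with
  | nil => intro st; simp [orFlags]
  | cons c rest ih => intro st; simp [orFlags, ih]

theorem orFlags_nil_st : ∀ (cs : List Char),
    orFlags cs [] = List.replicate cs.length false := by
  intro cs
  induction cs with
  | nil => simp [orFlags]
  | cons c rest ih => simp [orFlags, ih, List.replicate_succ]

theorem zipor_false_right : ∀ (acc : List Bool),
    List.zipWith (· || ·) acc (List.replicate acc.length false) = acc := by
  intro acc
  induction acc with
  | nil => rfl
  | cons a t ih => simp [List.replicate_succ, ih]

theorem zipor_false_left : ∀ (bs : List Bool),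
    List.zipWith (· || ·) (List.replicate bs.length false) bs = bs := by
  intro bs
  induction bs with
  | nil => rfl
  | cons a t ih => simp [List.replicate_succ, ih]

theorem zipor_assoc : ∀ (a b c : List Bool),
    List.zipWith (· || ·) (List.zipWith (· || ·) a b) c =
      List.zipWith (· || ·) a (List.zipWith (· || ·) b c) := by
  intro a
  induction a with
  | nil => intro b c; rfl
  | cons x t ih =>
    intro b c
    cases b with
    | nil => rfl
    | cons y u =>
      cases c with
      | nil => rfl
      | cons z v => simp [ih, Bool.or_assoc]

theorem orFlags_cons : ∀ (cs : List Char) (p : Nat × List Char) (rest : List (Nat × List Char)),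
    orFlags cs (p :: rest) =
      List.zipWith (· || ·) (pvFlagsB p.2 cs p.1) (orFlags cs rest) := by
  intro cs
  induction cs with
  | nil => intro p rest; simp [orFlags, pvFlagsB]
  | cons c cs ih =>
    intro p rest
    rw [flagsB_cons]
    simp only [orFlags, List.any_cons, List.map_cons, List.zipWith_cons_cons, List.cons.injEq]
    exact ⟨rfl, ih (pstep c p) (rest.map (pstep c))⟩

theorem splitAtB_fold (cs : List Char) :
    ∀ (st : List (Nat × List Char)) (acc : List Bool), acc.length = cs.length →
      st.foldl (fun a p => List.zipWith (· || ·) a (pvFlagsB p.2 cs p.1)) acc =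
        List.zipWith (· || ·) acc (orFlags cs st) := by
  intro st
  induction st with
  | nil =>
    intro acc h
    rw [List.foldl_nil, orFlags_nil_st, ← h, zipor_false_right]
  | cons p rest ih =>
    intro acc h
    rw [List.foldl_cons, ih _ (by rw [List.length_zipWith, flagsB_length]; omega),
      orFlags_cons, zipor_assoc]

theorem splitAtB_eq (cs : List Char) (sl : List (List Char)) :
    pvSplitAtB cs sl = orFlags cs (sl.map (fun s => (0, s))) := by
  unfold pvSplitAtB
  rw [← List.foldl_map (f := fun s => ((0 : Nat), s))
    (g := fun a (p : Nat × List Char) => List.zipWith (· || ·) a (pvFlagsB p.2 cs p.1))]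
  rw [splitAtB_fold cs _ _ (by simp)]
  rw [← orFlags_length cs (sl.map (fun s => (0, s))), zipor_false_left]

-- ---- phase 3: segmentation ----

def segsFrom (acc : List Char) : List Bool → List Char → List (List Char)
  | b :: bs, c :: cs =>
    if b then acc :: segsFrom [c] bs cs else segsFrom (acc ++ [c]) bs cs
  | _, _ => [acc]

theorem appendLast_append (c : Char) : ∀ (vs : List (List Char)) (acc : List Char),
    pvAppendLast (vs ++ [acc]) c = vs ++ [acc ++ [c]] := by
  intro vs
  induction vs with
  | nil => intro acc; rfl
  | cons v rest ih =>
    intro acc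
    cases rest with
    | nil => rfl
    | cons w t =>
      show pvAppendLast (v :: ((w :: t) ++ [acc])) c = _
      have hne : ((w :: t) ++ [acc]) ≠ [] := by simp
      calc pvAppendLast (v :: ((w :: t) ++ [acc])) c
          = v :: pvAppendLast ((w :: t) ++ [acc]) c := by
            simp only [pvAppendLast]
        _ = v :: ((w :: t) ++ [acc ++ [c]]) := by rw [ih]
        _ = _ := by simp

theorem varsOf_eq : ∀ (cs : List Char) (bs : List Bool) (vs : List (List Char)) (acc : List Char),
    varsOf (vs ++ [acc]) bs cs = vs ++ segsFrom acc bs cs := by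
  intro cs
  induction cs with
  | nil => intro bs vs acc; cases bs <;> simp [varsOf, segsFrom]
  | cons c rest ih =>
    intro bs vs acc
    cases bs with
    | nil => simp [varsOf, segsFrom]
    | cons b bt =>
      simp only [varsOf, segsFrom]
      cases b with
      | false =>
        rw [if_neg (by simp), if_neg (by simp), appendLast_append]
        exact ih bt vs (acc ++ [c])
      | true =>
        rw [if_pos rfl, if_pos rfl,
          show vs ++ [acc] ++ [[]] = (vs ++ [acc]) ++ [([] : List Char)] by simp,
          appendLast_append c (vs ++ [acc]) []]
        have := ih bt (vs ++ [acc]) ([] ++ [c])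
        simpa using this

theorem segsFrom_nonempty : ∀ (cs : List Char) (bs : List Bool) (acc : List Char),
    acc ≠ [] → ∀ v ∈ segsFrom acc bs cs, v ≠ [] := by
  intro cs
  induction cs with
  | nil =>
    intro bs acc h v hv
    cases bs <;> simp [segsFrom] at hv <;> simpa [hv] using h
  | cons c rest ih =>
    intro bs acc h v hv
    cases bs with
    | nil => simp [segsFrom] at hv; simpa [hv] using h
    | cons b bt =>
      simp only [segsFrom] at hv
      cases b with
      | false =>
        exact ih bt (acc ++ [c]) (by simp) v (by simpa using hv)
      | true =>
        rw [if_pos rfl] at hv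
        rcases List.mem_cons.mp hv with rfl | hv
        · exact h
        · exact ih bt [c] (by simp) v hv

theorem segsFrom_filter (cs : List Char) (bs : List Bool) (acc : List Char) (h : acc ≠ []) :
    (segsFrom acc bs cs).filter (fun v => !v.isEmpty) = segsFrom acc bs cs := by
  apply List.filter_eq_self.mpr
  intro v hv
  have := segsFrom_nonempty cs bs acc h v hv
  simpa [List.isEmpty_iff] using this

theorem segFold_base (L : List Char) (bs : List Bool) (hlen : bs.length = L.length)
    (start : Nat) (acc : List (List Char)) (_hs : start ≤ L.length) :
    (let r := (PySem.List.pyRange (L.length : Int) (L.length : Int) 1).foldl (pvSegStepB L bs)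
        (acc, (start : Int));
     r.1 ++ [L.drop r.2.toNat]) =
      acc ++ segsFrom ((L.drop start).take (L.length - start)) (bs.drop L.length)
        (L.drop L.length) := by
  have hr : PySem.List.pyRange (L.length : Int) (L.length : Int) 1 = [] := by
    simp [PySem.List.pyRange]
  rw [hr]
  simp only [List.foldl_nil, Int.toNat_natCast]
  have h1 : bs.drop L.length = [] := by rw [← hlen]; exact List.drop_length ..
  have h2 : L.drop L.length = [] := List.drop_length ..
  have h3 : (L.drop start).take (L.length - start) = L.drop start := by
    apply List.take_of_length_le
    simp
  rw [h1, h2, h3]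
  rfl

theorem segFold (L : List Char) (bs : List Bool) (hlen : bs.length = L.length) :
    ∀ (n k start : Nat) (acc : List (List Char)), L.length - k ≤ n → start ≤ k → k ≤ L.length →
      (let r := (PySem.List.pyRange (k : Int) (L.length : Int) 1).foldl (pvSegStepB L bs)
          (acc, (start : Int));
       r.1 ++ [L.drop r.2.toNat]) =
        acc ++ segsFrom ((L.drop start).take (k - start)) (bs.drop k) (L.drop k) := by
  intro n
  induction n with
  | zero =>
    intro k start acc hn hsk hkl
    have hk : k = L.length := by omega
    subst hk
    exact segFold_base L bs hlen start acc hsk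
  | succ n ih =>
    intro k start acc hn hsk hkl
    by_cases hk : k < L.length
    · have hkb : k < bs.length := by omega
      rw [PySem.List.pyRange_one_cons (by exact_mod_cast hk), List.foldl_cons]
      have hget : PySem.List.pyGetD bs (k : Int) false = bs[k] := by
        rw [PySem.List.pyGetD_natCast, List.getD_eq_getElem bs false hkb]
      rw [show pvSegStepB L bs (acc, (start : Int)) (k : Int) =
          (if bs[k] then (acc ++ [PySem.List.slice L (some (start : Int)) (some (k : Int))],
            (k : Int)) else (acc, (start : Int))) by
        simp [pvSegStepB, hget]]
      rw [List.drop_eq_getElem_cons hkb, List.drop_eq_getElem_cons hk]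
      cases hb : bs[k] with
      | true =>
        rw [if_pos rfl]
        have := ih (k + 1) k (acc ++ [PySem.List.slice L (some (start : Int)) (some (k : Int))])
          (by omega) (by omega) (by omega)
        simp only [Nat.cast_add, Nat.cast_one] at this ⊢
        rw [this]
        have h1 : (L.drop (k + 1 - 1)).take ((k+1) - k) = [L[k]] := by
          have : k + 1 - 1 = k := by omega
          rw [this, List.drop_eq_getElem_cons hk, show k + 1 - k = 1 by omega]
          rfl
        rw [PySem.List.slice_natCast]
        simp only [segsFrom]
        have h2 : (L.drop k).take (k + 1 - k) = [L[k]] := by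
          rw [List.drop_eq_getElem_cons hk, show k + 1 - k = 1 by omega]
          rfl
        rw [h2]
        simp
      | false =>
        rw [if_neg (by simp)]
        have := ih (k + 1) start acc (by omega) (by omega) (by omega)
        simp only [Nat.cast_add, Nat.cast_one] at this ⊢
        rw [this]
        have h3 : (L.drop start).take (k + 1 - start) =
            (L.drop start).take (k - start) ++ [L[k]] := by
          have he : k + 1 - start = (k - start) + 1 := by omega
          rw [he, List.take_add_one]
          have : (L.drop start)[k - start]? = some L[k] := by
            rw [List.getElem?_drop]
            have : start + (k - start) = k := by omega
            rw [this, List.getElem?_eq_getElem hk]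
          rw [this]
          rfl
        rw [h3]
        simp [segsFrom]
    · have hk' : k = L.length := by omega
      subst hk'
      exact segFold_base L bs hlen start acc hsk

-- ---- phase 4: alignment ----

theorem join_append_singleton (sep x : List Char) : ∀ (parts : List (List Char)), parts ≠ [] →
    PySem.Chars.join sep (parts ++ [x]) = PySem.Chars.join sep parts ++ sep ++ x := by
  intro parts
  induction parts with
  | nil => intro h; exact absurd rfl h
  | cons p rest ih =>
    intro _
    cases rest with
    | nil =>
      rw [List.cons_append, List.nil_append, PySem.Chars.join_cons_cons,
        PySem.Chars.join_singleton, PySem.Chars.join_singleton]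
    | cons q t =>
      rw [show (p :: q :: t) ++ [x] = p :: q :: (t ++ [x]) by simp,
        PySem.Chars.join_cons_cons,
        show q :: (t ++ [x]) = (q :: t) ++ [x] by simp,
        ih (by simp), PySem.Chars.join_cons_cons]
      simp [List.append_assoc]

theorem alignLoop_eq (sq : List Char) : ∀ (vs : List (List Char)) (j : Int)
    (parts : List (List Char)) (curr : Int),
    ((1 ≤ j ∧ parts ≠ []) ∨ (j = 0 ∧ parts = [])) →
    (pvAlignLoopA sq (PySem.List.enumerate vs j) (PySem.Chars.join ['+'] parts) curr).1
        = PySem.Chars.join ['+'] (pvAlignPartsB sq (PySem.List.enumerate vs j) parts curr).1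
      ∧ (pvAlignLoopA sq (PySem.List.enumerate vs j) (PySem.Chars.join ['+'] parts) curr).2
        = (pvAlignPartsB sq (PySem.List.enumerate vs j) parts curr).2
      ∧ ((vs ≠ [] ∨ parts ≠ []) →
          (pvAlignPartsB sq (PySem.List.enumerate vs j) parts curr).1 ≠ []) := by
  intro vs
  induction vs with
  | nil =>
    intro j parts curr hinv
    refine ⟨rfl, rfl, ?_⟩
    intro h
    rcases h with h | h
    · exact absurd rfl h
    · exact h
  | cons v rest ih =>
    intro j parts curr hinv
    rw [PySem.List.enumerate_cons]
    simp only [pvAlignLoopA, pvAlignPartsB]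
    rcases hinv with ⟨hj, hp⟩ | ⟨hj, hp⟩
    · -- i = j ≥ 1, parts nonempty: A writes the separating '+'
      rw [if_pos (show (0 : Int) < j by omega)]
      by_cases hc : curr < PySem.Chars.findFrom sq v curr none
      · simp only [if_pos hc]
        have hstep : PySem.Chars.join ['+'] parts ++ ['+'] ++
            PySem.Chars.slice sq (some curr) (some (PySem.Chars.findFrom sq v curr none)) ++
              ['+'] ++ ('X' :: PySem.Int.toChars j) =
            PySem.Chars.join ['+']
              ((parts ++
                  [PySem.Chars.slice sq (some curr) (some (PySem.Chars.findFrom sq v curr none))])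
                ++ [('X' :: PySem.Int.toChars j)]) := by
          rw [join_append_singleton _ _ _ (by simp), join_append_singleton _ _ _ hp]
        rw [hstep]
        obtain ⟨g1, g2, g3⟩ := ih (j + 1)
          ((parts ++
              [PySem.Chars.slice sq (some curr) (some (PySem.Chars.findFrom sq v curr none))])
            ++ ['X' :: PySem.Int.toChars j])
          (PySem.Chars.findFrom sq v curr none + (v.length : Int))
          (Or.inl ⟨by omega, by simp⟩)
        exact ⟨g1, g2, fun _ => g3 (Or.inr (by simp))⟩
      · simp only [if_neg hc]
        have hstep : PySem.Chars.join ['+'] parts ++ ['+'] ++ ('X' :: PySem.Int.toChars j) =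
            PySem.Chars.join ['+'] (parts ++ [('X' :: PySem.Int.toChars j)]) := by
          rw [join_append_singleton _ _ _ hp]
        rw [hstep]
        obtain ⟨g1, g2, g3⟩ := ih (j + 1) (parts ++ ['X' :: PySem.Int.toChars j])
          (PySem.Chars.findFrom sq v curr none + (v.length : Int))
          (Or.inl ⟨by omega, by simp⟩)
        exact ⟨g1, g2, fun _ => g3 (Or.inr (by simp))⟩
    · -- first iteration: i = 0, parts = [], res = ""
      subst hj
      subst hp
      rw [if_neg (show ¬ (0 : Int) < 0 by omega), PySem.Chars.join_nil]
      by_cases hc : curr < PySem.Chars.findFrom sq v curr none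
      · simp only [if_pos hc]
        have hstep : [] ++
            PySem.Chars.slice sq (some curr) (some (PySem.Chars.findFrom sq v curr none)) ++
              ['+'] ++ ('X' :: PySem.Int.toChars 0) =
            PySem.Chars.join ['+']
              (([] ++
                  [PySem.Chars.slice sq (some curr) (some (PySem.Chars.findFrom sq v curr none))])
                ++ [('X' :: PySem.Int.toChars 0)]) := by
          simp [PySem.Chars.join_cons_cons, PySem.Chars.join_singleton, List.append_assoc]
        rw [hstep]
        obtain ⟨g1, g2, g3⟩ := ih (0 + 1)
          (([] ++
              [PySem.Chars.slice sq (some curr) (some (PySem.Chars.findFrom sq v curr none))])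
            ++ ['X' :: PySem.Int.toChars 0])
          (PySem.Chars.findFrom sq v curr none + (v.length : Int))
          (Or.inl ⟨by omega, by simp⟩)
        exact ⟨g1, g2, fun _ => g3 (Or.inr (by simp))⟩
      · simp only [if_neg hc]
        have hstep : [] ++ ('X' :: PySem.Int.toChars 0) =
            PySem.Chars.join ['+'] ([] ++ [('X' :: PySem.Int.toChars 0)]) := by
          simp [PySem.Chars.join_singleton]
        rw [hstep]
        obtain ⟨g1, g2, g3⟩ := ih (0 + 1) ([] ++ ['X' :: PySem.Int.toChars 0])
          (PySem.Chars.findFrom sq v curr none + (v.length : Int))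
          (Or.inl ⟨by omega, by simp⟩)
        exact ⟨g1, g2, fun _ => g3 (Or.inr (by simp))⟩

theorem alignOne_eq (sq : List Char) (vs : List (List Char)) (hvs : vs = [] → sq = []) :
    pvAlignOneA sq vs = pvAlignOneB sq vs := by
  cases vs with
  | nil =>
    have hsq : sq = [] := hvs rfl
    subst hsq
    rfl
  | cons v rest =>
    obtain ⟨h1, h2, h3⟩ := alignLoop_eq sq (v :: rest) 0 [] 0 (Or.inr ⟨rfl, rfl⟩)
    rw [PySem.Chars.join_nil] at h1 h2
    have h3' := h3 (Or.inl (by simp))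
    unfold pvAlignOneA pvAlignOneB
    simp only
    rw [h1, h2]
    by_cases hlt : (pvAlignPartsB sq (PySem.List.enumerate (v :: rest) 0) [] 0).2 <
        (sq.length : Int)
    · rw [if_pos hlt, if_pos hlt, join_append_singleton _ _ _ h3']
      simp [List.append_assoc]
    · rw [if_neg hlt, if_neg hlt]

-- ---- assembly ----

theorem segsFrom_ne_nil : ∀ (cs : List Char) (bs : List Bool) (acc : List Char),
    segsFrom acc bs cs ≠ [] := by
  intro cs
  induction cs with
  | nil => intro bs acc; cases bs <;> simp [segsFrom]
  | cons c ct ih =>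
    intro bs acc
    cases bs with
    | nil => simp [segsFrom]
    | cons b bt =>
      simp only [segsFrom]
      cases b
      · rw [if_neg (by simp)]; exact ih bt (acc ++ [c])
      · rw [if_pos rfl]; simp

theorem segStep_snd_nonneg (L : List Char) (bs : List Bool) :
    ∀ (ks : List Int), (∀ x ∈ ks, 0 ≤ x) → ∀ (p : List (List Char) × Int), 0 ≤ p.2 →
      0 ≤ (ks.foldl (pvSegStepB L bs) p).2 := by
  intro ks
  induction ks with
  | nil => intro _ p hp; simpa using hp
  | cons k kt ih =>
    intro hk p hp
    rw [List.foldl_cons]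
    refine ih (fun x hx => hk x (by simp [hx])) _ ?_
    unfold pvSegStepB
    split
    · exact hk k (by simp)
    · exact hp

theorem diff_elem (x : List Char) (hx : x ≠ []) :
    pvAlignOneA x [] = '+' :: x ∧ pvAlignOneB x [] = x := by
  have hlen : (0 : Int) < (x.length : Int) := by
    cases x
    · exact absurd rfl hx
    · simp
  have hlen' : 0 < x.length := List.length_pos_of_ne_nil hx
  constructor
  · simp only [pvAlignOneA, pvAlignLoopA, PySem.List.enumerate_nil]
    simp [hx]
  · simp only [pvAlignOneB, pvAlignPartsB, PySem.List.enumerate_nil]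
    simp [hlen']

theorem main_eq (lcs : String) (sqs : List String) (hD : ¬ D_greedyAlign lcs sqs) :
    greedyAlign lcs sqs = greedyAlign_alt lcs sqs := by
  unfold greedyAlign greedyAlign_alt
  simp only
  cases hL : lcs.toList with
  | nil =>
    have hlcs : lcs = "" := String.toList_eq_nil_iff.mp hL
    have hsq : ∀ sq ∈ sqs, sq = "" := by
      intro sq hmem
      by_contra hne
      exact hD ⟨hlcs, sq, hmem, hne⟩
    have hrange : PySem.List.pyRange 1 ((([] : List Char).length : Int)) 1 = [] := by
      norm_num [PySem.List.pyRange]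
    rw [hrange]
    simp only [pvCharLoopA, List.foldl_nil, List.isEmpty_nil, if_true, Prod.mk.injEq]
    refine ⟨by simp, ?_⟩
    apply List.map_congr_left
    intro x hx
    obtain ⟨sq, hmem, rfl⟩ := List.mem_map.mp hx
    have : sq = "" := hsq sq hmem
    subst this
    rfl
  | cons c ct =>
    rw [charLoopA_eq, splitAtB_eq]
    have hbslen := orFlags_length (c :: ct)
      ((sqs.map String.toList).map (fun s => ((0 : Nat), s)))
    cases hof : orFlags (c :: ct) ((sqs.map String.toList).map (fun s => ((0 : Nat), s))) with
    | nil => rw [hof] at hbslen; simp at hbslen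
    | cons b bt =>
      rw [hof] at hbslen
      -- A's variable list is the segmentation of lcs at the OR-ed boundary flags
      have hA : ((varsOf [[]] (b :: bt) (c :: ct)).filter (fun v => !v.isEmpty))
          = segsFrom [c] bt ct := by
        rw [show ([[]] : List (List Char)) = [] ++ [[]] from rfl, varsOf_eq]
        simp only [List.nil_append, segsFrom]
        cases b
        · rw [if_neg (by simp)]
          exact segsFrom_filter ct bt [c] (by simp)
        · rw [if_pos rfl, List.filter_cons]
          simp only [List.isEmpty_nil, Bool.not_true, Bool.false_eq_true, if_false]
          exact segsFrom_filter ct bt [c] (by simp)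
      -- B's variable list is the same segmentation
      have hnon : 0 ≤ ((PySem.List.pyRange 1 (((c :: ct).length : Int)) 1).foldl
          (pvSegStepB (c :: ct) (b :: bt)) ([], 0)).2 := by
        refine segStep_snd_nonneg (c :: ct) (b :: bt) _ ?_ ([], 0) (by simp)
        intro x hx
        have := PySem.List.mem_pyRange_one.mp hx
        omega
      have hfold := segFold (c :: ct) (b :: bt) hbslen (c :: ct).length 1 0 []
        (by omega) (by omega) (by simp)
      simp only [Nat.cast_one, Nat.cast_zero] at hfold
      have hB : (if (c :: ct).isEmpty then
            ((PySem.List.pyRange 1 (((c :: ct).length : Int)) 1).foldl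
              (pvSegStepB (c :: ct) (b :: bt)) ([], 0)).1
          else
            ((PySem.List.pyRange 1 (((c :: ct).length : Int)) 1).foldl
              (pvSegStepB (c :: ct) (b :: bt)) ([], 0)).1 ++
              [PySem.List.slice (c :: ct)
                (some ((PySem.List.pyRange 1 (((c :: ct).length : Int)) 1).foldl
                  (pvSegStepB (c :: ct) (b :: bt)) ([], 0)).2) none])
          = segsFrom [c] bt ct := by
        rw [if_neg (by simp), PySem.List.slice_from _ hnon, hfold]
        simp only [List.drop_succ_cons, List.drop_zero, List.nil_append]
        rw [show (1 : Nat) - 0 = 1 from rfl]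
        rfl
      rw [hA, hB]
      simp only [Prod.mk.injEq]
      refine ⟨by simp, ?_⟩
      apply List.map_congr_left
      intro x _
      rw [alignOne_eq x (segsFrom [c] bt ct)
        (fun h => absurd h (segsFrom_ne_nil ct bt [c]))]

-- ===== VERDICT (by name: the statement is the Claim_ definition above) =====
theorem greedyAlign_spec : Claim_unchanged_greedyAlign := by
  intro lcs sqs _ hD
  exact main_eq lcs sqs hD

theorem greedyAlign_changed : Claim_changed_greedyAlign := by
  unfold Claim_changed_greedyAlign; decide

theorem greedyAlign_tight : Claim_exact_greedyAlign := by
  unfold Claim_exact_greedyAlign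
  intro lcs sqs _ hDd heq
  obtain ⟨hlcs, sq0, hmem, hne⟩ := hDd
  subst hlcs
  have h2 := congrArg Prod.snd heq
  simp only [greedyAlign, greedyAlign_alt] at h2
  rw [show ("" : String).toList = [] from rfl] at h2
  rw [show PySem.List.pyRange 1 ((([] : List Char).length : Int)) 1 = [] by
    norm_num [PySem.List.pyRange]] at h2
  simp only [pvCharLoopA, List.foldl_nil, List.isEmpty_nil, if_true, List.map_map] at h2
  have helem := List.map_eq_map_iff.mp h2 sq0 hmem
  simp only [Function.comp] at helem
  have hx : sq0.toList ≠ [] := fun h => hne (String.toList_eq_nil_iff.mp h)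
  obtain ⟨hA1, hB1⟩ := diff_elem sq0.toList hx
  have : ((List.filter (fun v => !v.isEmpty) [[]]) : List (List Char)) = [] := rfl
  rw [this] at helem
  rw [hA1, hB1] at helem
  exact absurd (String.ofList_inj.mp helem) (by simp)
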